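-- pv_equiv track=rewrite | github.com/CACocagarcia/Python_Coding_Challenges_3 | Python_Function_Practice_Exercises.py | old_macdonald
-- ===== SOURCE A (Python) =====
-- def old_macdonald(name):
--     #placeholder variables
--     outputstring = ''
--
--     for position,letter in enumerate(name): #enumarating allows to reference each letter at a specific location of the string array
--         if position == 0:
--             outputstring += letter.upper()
--         elif position == 3:
--             outputstring += letter.upper()
--         else:
--             outputstring += letter
--     return outputstring
-- ===== SOURCE B (Python) =====
-- def old_macdonald(name):
--     return name[:1].upper() + name[1:3] + name[3:4].upper() + name[4:]
-- ===== Notes on version B (the rewrite author's own statement) =====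
-- stated objective: simpler
-- what changed: Replaces the enumerate loop with positional branches by a single loop-free concatenation of four slices, uppercasing the one-character slices at positions 0 and 3.
import Mathlib
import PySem

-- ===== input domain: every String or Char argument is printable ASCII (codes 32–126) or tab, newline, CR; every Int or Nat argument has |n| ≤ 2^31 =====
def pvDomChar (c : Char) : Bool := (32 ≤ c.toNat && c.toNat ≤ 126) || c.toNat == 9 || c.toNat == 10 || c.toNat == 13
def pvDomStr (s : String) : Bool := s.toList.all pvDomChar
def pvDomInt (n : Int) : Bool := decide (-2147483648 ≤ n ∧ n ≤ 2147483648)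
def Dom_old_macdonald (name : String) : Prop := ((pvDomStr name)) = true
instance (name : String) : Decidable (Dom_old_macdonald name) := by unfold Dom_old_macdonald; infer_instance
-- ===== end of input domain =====

-- B replaces A's enumerate loop by a loop-free concatenation of four slices (simpler decomposition).


-- ===== PORT A =====
-- the loop body: position 0 or 3 → uppercased letter, else the letter
def pvStepA (acc : List Char) (pl : Int × Char) : List Char :=
  if pl.1 == 0 then acc ++ PySem.Chars.upper [pl.2]
  else if pl.1 == 3 then acc ++ PySem.Chars.upper [pl.2]
  else acc ++ [pl.2]

def old_macdonald (name : String) : String :=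
  String.ofList ((PySem.List.enumerate name.toList 0).foldl pvStepA [])

-- ===== PORT B =====
def old_macdonald_alt (name : String) : String :=
  let cs := name.toList
  String.ofList (PySem.Chars.upper (PySem.List.slice cs none (some 1))
    ++ PySem.List.slice cs (some 1) (some 3)
    ++ PySem.Chars.upper (PySem.List.slice cs (some 3) (some 4))
    ++ PySem.List.slice cs (some 4) none)

-- ===== PRECONDITION & SPEC =====
def Spec_old_macdonald (name : String) (out : String) : Prop := out = old_macdonald_alt name
instance (name : String) (out : String) : Decidable (Spec_old_macdonald name out) := by unfold Spec_old_macdonald; infer_instance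

-- ===== CLAIM (what is proved, stated in full; the proofs are below) =====
def Claim_equal_old_macdonald : Prop := ∀ (name : String), Dom_old_macdonald name → Spec_old_macdonald name (old_macdonald name)

-- ===== LEMMAS AND PROOFS =====
-- once past position 3 the loop only appends the letters unchanged
theorem pvFoldA_tail (xs : List Char) : ∀ (s : Nat) (acc : List Char), 4 ≤ s →
    (PySem.List.enumerate xs (s : Int)).foldl pvStepA acc = acc ++ xs := by
  induction xs with
  | nil => intro s acc _; simp [PySem.List.enumerate_nil]
  | cons x xs ih =>
    intro s acc hs
    rw [PySem.List.enumerate_cons, List.foldl_cons]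
    have h0 : ((s : Int) == 0) = false := by simp; omega
    have h3 : ((s : Int) == 3) = false := by simp; omega
    have : ((s : Int) + 1) = ((s + 1 : Nat) : Int) := by push_cast; ring
    rw [this, ih (s + 1) _ (by omega)]
    simp [pvStepA, h0, h3]

theorem old_macdonald_spec : Claim_equal_old_macdonald := by
  unfold Claim_equal_old_macdonald
  intro name _
  unfold Spec_old_macdonald old_macdonald old_macdonald_alt
  match h : name.toList with
  | [] => simp [PySem.List.enumerate_nil, PySem.List.slice, PySem.Chars.upper]
  | [a] =>
    simp [PySem.List.enumerate_cons, PySem.List.enumerate_nil, pvStepA,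
      PySem.List.slice, PySem.Chars.upper]
  | [a, b] =>
    simp [PySem.List.enumerate_cons, PySem.List.enumerate_nil, pvStepA,
      PySem.List.slice, PySem.Chars.upper]
  | [a, b, c] =>
    simp [PySem.List.enumerate_cons, PySem.List.enumerate_nil, pvStepA,
      PySem.List.slice, PySem.Chars.upper]
  | a :: b :: c :: d :: rest =>
    simp only [PySem.List.enumerate_cons, List.foldl_cons]
    norm_num
    rw [show (4 : Int) = ((4 : Nat) : Int) from rfl, pvFoldA_tail rest 4 _ (by omega)]
    simp [pvStepA, PySem.List.slice, PySem.Chars.upper, ← String.ofList_append]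

-- ===== VERDICT (by name: the statement is the Claim_ definition above) =====
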